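/- GENERATED by farm/mkstatement.py from design/units.tsv (unit `DGifGetExtension.P`) and the assertions of Gif/Spec/Seg_DGifGetExtension.lean — do not edit.
   THE STATEMENT of the proof unit `DGifGetExtension.P`: segment P of `DGifGetExtension` (16 instructions; entries 0x109a80;
   exits 0x109aca; ranges 0x109a80-0x109aca)
   takes each of its entry assertions to one of its exit assertions (`Gif.Spec.DGifGetExtension.SegP`), given the contracts of its callees.
   What the names mean: ProgX/Base/Spec/Basic.lean (the shared hypotheses), Gif/Spec/Seg_DGifGetExtension.lean (the assertions). The theorem to prove:
   `theorem DGifGetExtension_P_ok : Gif.Spec.DGifGetExtension_P.Statement`. -/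
import Gif.Code
import Gif.Dec.All
import Gif.Labels
import Gif.Spec.Seg_DGifGetExtension
namespace Gif.Spec.DGifGetExtension_P
open X86 X86.User Asan

/-- The statement of unit `DGifGetExtension.P`. -/
def Statement : Prop :=
  ∀ (Lay : Layout) (_hLay : Lay.hi = 0x1000000) (μ : Microarch) (_hμ : UserX.MicroOK μ) (u₀ : State)
    (_hcode : HasCodeNat Lay u₀ Gif.L.DGifGetExtension.entry Gif.Code.code_DGifGetExtension.nat Gif.L.DGifGetExtension.size),
    Gif.Spec.DGifGetExtension.SegP Lay μ u₀

end Gif.Spec.DGifGetExtension_P
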